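-- pv_equiv track=rewrite | github.com/ywy2090/WeDPR-Component | python/ppc_common/ppc_utils/cem_utils.py | parse_dataset_field_map
-- ===== SOURCE A (Python) =====
-- def parse_dataset_field_map(dataset_id_set, field_dataset_map):
--     dataset_field_map = {}
--     for dataset_id in dataset_id_set:
--         for field, field_dataset_id_set in field_dataset_map.items():
--             if dataset_id in field_dataset_id_set:
--                 if dataset_id in dataset_field_map:
--                     dataset_field_set = dataset_field_map[dataset_id]
--                 else:
--                     dataset_field_set = set()
--                     dataset_field_map[dataset_id] = dataset_field_set
--                 dataset_field_set.add(field)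
--     return dataset_field_map
-- ===== SOURCE B (Python) =====
-- def parse_dataset_field_map(dataset_id_set, field_dataset_map):
--     inverted = {}
--     for field, field_dataset_id_set in field_dataset_map.items():
--         for dataset_id in field_dataset_id_set:
--             inverted.setdefault(dataset_id, set()).add(field)
--     return {dataset_id: inverted[dataset_id]
--             for dataset_id in dataset_id_set
--             if dataset_id in inverted}
-- ===== Notes on version B (the rewrite author's own statement) =====
-- stated objective: faster
-- what changed: B inverts field_dataset_map once (field -> ids becomes id -> fields) and then does one dict lookup per dataset_id, instead of A's rescan of the whole field map for every dataset_id.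
import Mathlib
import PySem

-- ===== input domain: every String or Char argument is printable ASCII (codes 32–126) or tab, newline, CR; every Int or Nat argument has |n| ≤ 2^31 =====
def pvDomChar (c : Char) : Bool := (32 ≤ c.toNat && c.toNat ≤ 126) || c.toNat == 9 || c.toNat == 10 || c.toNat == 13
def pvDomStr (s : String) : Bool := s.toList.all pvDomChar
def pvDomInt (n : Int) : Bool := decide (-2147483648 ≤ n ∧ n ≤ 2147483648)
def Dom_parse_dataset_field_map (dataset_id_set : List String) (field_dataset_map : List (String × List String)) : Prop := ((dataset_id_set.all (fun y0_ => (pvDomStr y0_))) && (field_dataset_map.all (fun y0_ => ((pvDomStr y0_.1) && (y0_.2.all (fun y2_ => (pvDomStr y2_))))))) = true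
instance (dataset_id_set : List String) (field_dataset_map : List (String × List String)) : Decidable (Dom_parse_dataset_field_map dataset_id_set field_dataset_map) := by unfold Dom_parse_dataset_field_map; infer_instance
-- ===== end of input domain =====

-- ===== PORT A =====
-- B inverts the field map once instead of rescanning it per dataset_id (faster; return-value equivalence).
def parse_dataset_field_map (dataset_id_set : List String) (field_dataset_map : List (String × List String)) : List (String × List String) :=
  (dataset_id_set.foldl
    (fun (d : PySem.Dict String (PySem.Set String)) dataset_id =>
      field_dataset_map.foldl
        (fun (d : PySem.Dict String (PySem.Set String)) p =>
          if PySem.Set.contains p.2 dataset_id then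
            d.modify dataset_id PySem.Set.empty (fun s => PySem.Set.add s p.1)
          else d)
        d)
    PySem.Dict.empty).items

-- ===== PORT B =====
-- helper: build inverted map dataset_id -> set of fields in one pass over field_dataset_map
def pvInvert (field_dataset_map : List (String × List String)) : PySem.Dict String (PySem.Set String) :=
  field_dataset_map.foldl
    (fun (d : PySem.Dict String (PySem.Set String)) p =>
      p.2.foldl
        (fun (d : PySem.Dict String (PySem.Set String)) dataset_id =>
          d.modify dataset_id PySem.Set.empty (fun s => PySem.Set.add s p.1))
        d)
    PySem.Dict.empty

def parse_dataset_field_map_alt (dataset_id_set : List String) (field_dataset_map : List (String × List String)) : List (String × List String) :=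
  let inv := pvInvert field_dataset_map
  (dataset_id_set.foldl
    (fun (d : PySem.Dict String (PySem.Set String)) dataset_id =>
      if inv.contains dataset_id then
        d.insert dataset_id (inv.getD dataset_id PySem.Set.empty)
      else d)
    PySem.Dict.empty).items

-- ===== PRECONDITION & SPEC =====
def Spec_parse_dataset_field_map (dataset_id_set : List String) (field_dataset_map : List (String × List String)) (out : List (String × List String)) : Prop := out = parse_dataset_field_map_alt dataset_id_set field_dataset_map
instance (dataset_id_set : List String) (field_dataset_map : List (String × List String)) (out : List (String × List String)) : Decidable (Spec_parse_dataset_field_map dataset_id_set field_dataset_map out) := by unfold Spec_parse_dataset_field_map; infer_instance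

-- ===== CLAIM (what is proved, stated in full; the proofs are below) =====
def Claim_equal_parse_dataset_field_map : Prop := ∀ (dataset_id_set : List String) (field_dataset_map : List (String × List String)), Dom_parse_dataset_field_map dataset_id_set field_dataset_map → Spec_parse_dataset_field_map dataset_id_set field_dataset_map (parse_dataset_field_map dataset_id_set field_dataset_map)

-- ===== LEMMAS AND PROOFS =====

-- the fields whose set contains `did`, in field order
def pvLm (fm : List (String × List String)) (did : String) : List String :=
  (fm.filter (fun p => PySem.Set.contains p.2 did)).map (·.1)

theorem pv_modify_eq (d : PySem.Dict String (PySem.Set String)) (k : String)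
    (dflt : PySem.Set String) (f : PySem.Set String → PySem.Set String) :
    d.modify k dflt f = d.insert k (f (d.getD k dflt)) := rfl

-- Set helper facts
theorem pv_add_add_self (s : PySem.Set String) (x : String) :
    PySem.Set.add (PySem.Set.add s x) x = PySem.Set.add s x := by
  apply PySem.Set.add_of_mem
  simp [PySem.Set.mem_add]

theorem pv_update_of_subset (L : List String) (s : PySem.Set String) (h : ∀ x ∈ L, x ∈ s) :
    PySem.Set.update s L = s := by
  induction L generalizing s with
  | nil => rfl
  | cons x L ih =>
    rw [PySem.Set.update_cons, PySem.Set.add_of_mem (h x (by simp))]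
    exact ih s (fun y hy => h y (by simp [hy]))

-- inner loop of pvInvert: effect on one key
theorem pv_inner_get? (ids : List String) (f : String)
    (d : PySem.Dict String (PySem.Set String)) (did : String) :
    (ids.foldl (fun d x => d.modify x PySem.Set.empty (fun s => PySem.Set.add s f)) d).get? did =
      if did ∈ ids then some (PySem.Set.add (d.getD did PySem.Set.empty) f) else d.get? did := by
  induction ids generalizing d with
  | nil => simp
  | cons x ids ih =>
    simp only [List.foldl_cons]
    rw [ih]
    by_cases hdx : did = x
    · subst hdx
      by_cases hmem : did ∈ ids
      · simp only [hmem, if_true, List.mem_cons, true_or]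
        rw [pv_modify_eq, PySem.Dict.getD_insert_self, pv_add_add_self]
      · simp only [hmem, if_false, List.mem_cons, true_or, if_true]
        rw [pv_modify_eq, PySem.Dict.get?_insert_self]
    · by_cases hmem : did ∈ ids
      · simp only [hmem, if_true, List.mem_cons, or_true]
        rw [pv_modify_eq, PySem.Dict.getD_insert_of_ne _ _ _ hdx]
      · simp only [hmem, if_false, List.mem_cons, hdx, false_or]
        rw [pv_modify_eq, PySem.Dict.get?_insert_of_ne _ _ hdx]

-- get? of pvInvert's fold, from any starting dict
theorem pv_inv_get?_aux (fm : List (String × List String))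
    (d : PySem.Dict String (PySem.Set String)) (did : String) :
    (fm.foldl (fun d p => p.2.foldl (fun d x => d.modify x PySem.Set.empty (fun s => PySem.Set.add s p.1)) d) d).get? did =
      (pvLm fm did).foldl (fun o f => some (PySem.Set.add (o.getD PySem.Set.empty) f)) (d.get? did) := by
  induction fm generalizing d with
  | nil => rfl
  | cons p fm ih =>
    simp only [List.foldl_cons]
    rw [ih]
    by_cases hc : PySem.Set.contains p.2 did
    · have hmem : did ∈ p.2 := (PySem.Set.contains_iff _ _).mp hc
      rw [pv_inner_get? p.2 p.1 d did]
      simp [pvLm, hmem, PySem.Dict.getD_eq_get?_getD]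
    · have hmem : did ∉ p.2 := fun h => hc ((PySem.Set.contains_iff _ _).mpr h)
      rw [pv_inner_get? p.2 p.1 d did]
      simp [pvLm, hmem]

theorem pv_optfold_some (L : List String) (s : PySem.Set String) :
    L.foldl (fun o f => some (PySem.Set.add (o.getD PySem.Set.empty) f)) (some s) =
      some (PySem.Set.update s L) := by
  induction L generalizing s with
  | nil => rfl
  | cons f L ih => simpa [PySem.Set.update_cons] using ih (PySem.Set.add s f)

theorem pv_inv_get? (fm : List (String × List String)) (did : String) :
    (pvInvert fm).get? did =
      if pvLm fm did = [] then none else some (PySem.Set.ofList (pvLm fm did)) := by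
  unfold pvInvert
  rw [pv_inv_get?_aux]
  have hemp : (PySem.Dict.empty : PySem.Dict String (PySem.Set String)).get? did = none := by
    simp [pysem]
  rw [hemp]
  cases hL : pvLm fm did with
  | nil => rfl
  | cons f L =>
    simp only [List.foldl_cons, Option.getD_none]
    rw [pv_optfold_some, ← PySem.Set.update_cons, PySem.Set.update_empty]
    simp

-- A's inner loop only touches key `did` and equals a fold over pvLm
theorem pv_stepA_as_Lm (fm : List (String × List String)) (did : String)
    (d : PySem.Dict String (PySem.Set String)) :
    fm.foldl (fun d p => if PySem.Set.contains p.2 did then d.modify did PySem.Set.empty (fun s => PySem.Set.add s p.1) else d) d =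
      (pvLm fm did).foldl (fun d f => d.modify did PySem.Set.empty (fun s => PySem.Set.add s f)) d := by
  induction fm generalizing d with
  | nil => rfl
  | cons p fm ih =>
    by_cases hc : PySem.Set.contains p.2 did
    · simp only [List.foldl_cons, hc, if_true, pvLm, List.filter_cons, List.map_cons]
      exact ih _
    · simp only [List.foldl_cons, hc, pvLm, List.filter_cons]
      simp only [Bool.false_eq_true, if_false]
      exact ih _

theorem pv_modfold (L : List String) (did : String)
    (d : PySem.Dict String (PySem.Set String)) (h : L ≠ []) :
    L.foldl (fun d f => d.modify did PySem.Set.empty (fun s => PySem.Set.add s f)) d =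
      d.insert did (PySem.Set.update (d.getD did PySem.Set.empty) L) := by
  induction L generalizing d with
  | nil => exact absurd rfl h
  | cons f L ih =>
    by_cases hL : L = []
    · subst hL
      simp only [List.foldl_cons, List.foldl_nil]
      rw [pv_modify_eq, PySem.Set.update_cons, PySem.Set.update_nil]
    · simp only [List.foldl_cons]
      rw [ih _ hL, pv_modify_eq, PySem.Dict.getD_insert_self, PySem.Dict.insert_insert_self,
        PySem.Set.update_cons]

-- invariant: every stored value is the full field set of its key
def pvInv (fm : List (String × List String)) (d : PySem.Dict String (PySem.Set String)) : Prop :=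
  ∀ k, d.get? k = none ∨ d.get? k = some (PySem.Set.ofList (pvLm fm k))

theorem pv_outer_eq (fm : List (String × List String)) (ds : List String)
    (d : PySem.Dict String (PySem.Set String)) (hI : pvInv fm d) :
    ds.foldl (fun d did => fm.foldl (fun d p => if PySem.Set.contains p.2 did then d.modify did PySem.Set.empty (fun s => PySem.Set.add s p.1) else d) d) d =
      ds.foldl (fun d did => if (pvInvert fm).contains did then d.insert did ((pvInvert fm).getD did PySem.Set.empty) else d) d := by
  induction ds generalizing d with
  | nil => rfl
  | cons did ds ih =>
    simp only [List.foldl_cons]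
    rw [pv_stepA_as_Lm]
    by_cases hnil : pvLm fm did = []
    · have hcont : (pvInvert fm).contains did = false := by
        rw [PySem.Dict.contains_eq_isSome_get?, pv_inv_get?, if_pos hnil]
        rfl
      rw [hnil, hcont]
      simp only [List.foldl_nil, Bool.false_eq_true, if_false]
      exact ih d hI
    · have hget : (pvInvert fm).get? did = some (PySem.Set.ofList (pvLm fm did)) := by
        rw [pv_inv_get?, if_neg hnil]
      have hcont : (pvInvert fm).contains did = true := by
        rw [PySem.Dict.contains_eq_isSome_get?, hget]; rfl
      have hgetD : (pvInvert fm).getD did PySem.Set.empty = PySem.Set.ofList (pvLm fm did) := by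
        rw [PySem.Dict.getD_eq_get?_getD, hget]; rfl
      have hval : PySem.Set.update (d.getD did PySem.Set.empty) (pvLm fm did) =
          PySem.Set.ofList (pvLm fm did) := by
        rcases hI did with hnone | hsome
        · rw [PySem.Dict.getD_eq_get?_getD, hnone, Option.getD_none, PySem.Set.update_empty]
        · rw [PySem.Dict.getD_eq_get?_getD, hsome, Option.getD_some]
          exact pv_update_of_subset _ _ (fun x hx => (PySem.Set.mem_ofList _ _).mpr hx)
      rw [pv_modfold _ _ _ hnil, hval, hcont, hgetD]
      simp only [if_true]
      apply ih
      intro k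
      by_cases hk : k = did
      · subst hk
        exact Or.inr (PySem.Dict.get?_insert_self _ _ _)
      · rw [PySem.Dict.get?_insert_of_ne _ _ hk]
        exact hI k

-- ===== VERDICT (by name: the statement is the Claim_ definition above) =====
theorem parse_dataset_field_map_spec : Claim_equal_parse_dataset_field_map := by
  intro ds fm _
  unfold Spec_parse_dataset_field_map parse_dataset_field_map parse_dataset_field_map_alt
  have h := pv_outer_eq fm ds PySem.Dict.empty (fun k => Or.inl (by simp [pysem]))
  simp only [h]
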